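-- pv_equiv track=rewrite | github.com/KINOX0924/Programmers_codingtest | 프로그래머스/0/120830. 양꼬치/양꼬치.py | solution
-- ===== SOURCE A (Python) =====
-- def solution(n, k):
--     service_drink = 0
--     sum_payment   = 0
--
--     while n >= 1 :
--         if n >= 10 :
--             sum_payment += 120000
--             n -= 10
--             service_drink += 1
--         elif n != 0 :
--             sum_payment += 12000
--             n -= 1
--
--     k -= service_drink
--     sum_payment += (k*2000)
--
--     return sum_payment
-- ===== SOURCE B (Python) =====
-- def solution(n, k):
--     # closed form: 12000 won per skewer, one free drink per 10 skewers
--     return 12000 * n + (k - n // 10) * 2000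
-- ===== Notes on version B (the rewrite author's own statement) =====
-- stated objective: faster
-- what changed: Replaced A's skewer-by-skewer while loop with the closed-form formula 12000*n + (k - n//10)*2000.
-- outside the precondition, e.g. on solution(-3, 2): A returns 4000, B returns -30000
import Mathlib
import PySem

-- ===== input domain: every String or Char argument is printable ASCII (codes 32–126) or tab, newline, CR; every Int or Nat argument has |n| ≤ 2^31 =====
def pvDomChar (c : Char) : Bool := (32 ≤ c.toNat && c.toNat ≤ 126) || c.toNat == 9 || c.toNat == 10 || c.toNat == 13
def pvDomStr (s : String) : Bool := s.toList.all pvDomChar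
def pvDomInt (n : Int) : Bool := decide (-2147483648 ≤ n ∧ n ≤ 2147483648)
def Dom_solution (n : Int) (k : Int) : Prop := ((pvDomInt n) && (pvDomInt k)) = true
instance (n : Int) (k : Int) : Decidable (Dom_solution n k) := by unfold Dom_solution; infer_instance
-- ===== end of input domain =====

-- B replaces A's per-skewer while loop with the closed-form price formula (faster, O(1)).
-- Pre_solution restricts to the natural domain n ≥ 0 (a skewer count); negative n is outside the task's domain.


-- ===== PORT A =====
-- the while loop, carrying (service_drink, sum_payment); the `n ≠ 0` elif is kept
-- (under n ≥ 1 its else-arm is unreachable in Python; here it returns the state so the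
-- function is total)
def solutionLoop (n service sum : Int) : Int × Int :=
  if h : n ≥ 1 then
    if n ≥ 10 then solutionLoop (n - 10) (service + 1) (sum + 120000)
    else if n ≠ 0 then solutionLoop (n - 1) service (sum + 12000)
    else (service, sum)
  else (service, sum)
termination_by n.toNat
decreasing_by all_goals omega

def solution (n : Int) (k : Int) : Int :=
  let st := solutionLoop n 0 0
  st.2 + (k - st.1) * 2000

-- ===== PORT B =====
def solution_alt (n : Int) (k : Int) : Int :=
  12000 * n + (k - PySem.Int.floordiv n 10) * 2000

-- ===== PRECONDITION & SPEC =====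
-- Pre_ excludes negative n (outside the natural domain of a skewer count): there A's loop
-- body never runs and A returns k*2000, which B's closed form does not reproduce.
def Pre_solution (n : Int) (k : Int) : Prop := 0 ≤ n
instance (n : Int) (k : Int) : Decidable (Pre_solution n k) := by unfold Pre_solution; infer_instance
def pvWitness_solution : Int × Int := (23, 5)

def Spec_solution (n : Int) (k : Int) (out : Int) : Prop := out = solution_alt n k
instance (n : Int) (k : Int) (out : Int) : Decidable (Spec_solution n k out) := by unfold Spec_solution; infer_instance

-- ===== CLAIM (what is proved, stated in full; the proofs are below) =====
def Claim_equal_solution : Prop := ∀ (n : Int) (k : Int), Dom_solution n k → Pre_solution n k → Spec_solution n k (solution n k)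

-- ===== LEMMAS AND PROOFS =====

theorem solutionLoop_closed (m : Nat) : ∀ (n service sum : Int), n.toNat = m → 0 ≤ n →
    solutionLoop n service sum = (service + n / 10, sum + 12000 * n) := by
  induction m using Nat.strong_induction_on with
  | _ m ih =>
    intro n service sum hm hn
    rw [solutionLoop]
    split_ifs with h1 h2 h3
    · rw [ih (n - 10).toNat (by omega) _ _ _ rfl (by omega)]
      have : (n - 10) / 10 = n / 10 - 1 := by omega
      rw [Prod.mk.injEq]; omega
    · rw [ih (n - 1).toNat (by omega) _ _ _ rfl (by omega)]
      have : (n - 1) / 10 = n / 10 := by omega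
      rw [Prod.mk.injEq]; omega
    · omega
    · have : n = 0 := by omega
      subst this; simp

-- ===== VERDICT (by name: the statement is the Claim_ definition above) =====
theorem solution_spec : Claim_equal_solution := by
  intro n k _ hpre
  unfold Spec_solution solution solution_alt
  rw [solutionLoop_closed n.toNat n 0 0 rfl hpre,
      PySem.Int.floordiv_eq_ediv_of_pos (by omega)]
  ring
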